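-- pv_equiv track=rewrite | github.com/newdimm/adventofcode | 2019/day_04/day_04_02.py | check
-- ===== SOURCE A (Python) =====
-- def check(i):
--   last_digit = 10
--   seen_double = False
--   seen_double_ctr = 0
--
--   while (i):
--     new_i = i // 10
--     digit = i - new_i * 10
--     #print ("%d -> %d + %d (%d)" % (i, new_i, digit, last_digit))
--     if digit > last_digit:
--       return False
--     if digit == last_digit:
--       seen_double_ctr += 1
--     else:
--       if seen_double_ctr == 1:
--         seen_double = True
--       seen_double_ctr = 0
--     last_digit = digit
--     i = new_i
--
--   return seen_double or seen_double_ctr == 1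
-- ===== SOURCE B (Python) =====
-- def check(i):
--     s = str(i)
--     if list(s) != sorted(s):
--         return False
--     runs = []
--     prev = None
--     for c in s:
--         if c == prev:
--             runs[-1] += 1
--         else:
--             runs.append(1)
--             prev = c
--     return 2 in runs
-- ===== Notes on version B (the rewrite author's own statement) =====
-- stated objective: idiomatic
-- what changed: Replaces the modular digit-peeling while-loop (carrying last_digit/seen_double/counter state) by the string representation: a non-decreasing test via comparison with the sorted digit string plus a run-length grouping pass checked for a run of length exactly two.
-- outside the precondition, e.g. on check(-1): A does not finish within the time limit, B returns False; on check(-44): A returns False, B returns True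
import Mathlib
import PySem

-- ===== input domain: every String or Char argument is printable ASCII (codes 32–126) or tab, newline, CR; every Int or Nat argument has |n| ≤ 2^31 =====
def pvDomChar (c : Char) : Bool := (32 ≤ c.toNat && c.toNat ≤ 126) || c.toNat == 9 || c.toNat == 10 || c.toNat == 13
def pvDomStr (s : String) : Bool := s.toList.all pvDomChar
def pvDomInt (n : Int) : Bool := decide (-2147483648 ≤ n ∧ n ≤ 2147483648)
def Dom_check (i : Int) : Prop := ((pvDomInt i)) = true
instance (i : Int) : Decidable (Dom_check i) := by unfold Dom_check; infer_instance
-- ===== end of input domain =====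

-- B replaces A's digit-peeling while-loop by str(i) + a sortedness test + run-length grouping (idiomatic; same cost).

-- ===== PORT A =====
-- while (i): peel the low digit with floor division; fuel = |i|+1 bounds the iterations (each step strictly
-- decreases a positive i, so the fuel is never exhausted on the inputs Pre_check admits).
def checkLoop : Nat → Int → Int → Bool → Int → Bool
  | 0, _, _, _, _ => false
  | fuel + 1, i, last, sd, ctr =>
    if i = 0 then sd || decide (ctr = 1)
    else
      let ni := PySem.Int.floordiv i 10
      let d := i - ni * 10
      if d > last then false
      else if d = last then checkLoop fuel ni d sd (ctr + 1)
      else checkLoop fuel ni d (if ctr = 1 then true else sd) 0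

def check (i : Int) : Bool := checkLoop (i.natAbs + 1) i 10 false 0

-- ===== PORT B =====
-- runs[-1] += 1
def bumpLast : List Int → List Int
  | [] => []
  | [x] => [x + 1]
  | x :: y :: t => x :: bumpLast (y :: t)

-- the for-loop over the characters of s, carrying prev and the run-length list
def runLoop : List Char → Option Char → List Int → List Int
  | [], _, runs => runs
  | c :: t, prev, runs =>
    if some c = prev then runLoop t prev (bumpLast runs)
    else runLoop t (some c) (runs ++ [1])

def check_alt (i : Int) : Bool :=
  let s := (PySem.Int.toStr i).toList
  if s = PySem.List.sorted s (fun c => c) false then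
    (runLoop s none []).contains 2
  else false

-- ===== PRECONDITION & SPEC =====
-- Pre_check excludes negative inputs: there A either never returns (i // 10 stabilises at -1, e.g. i = -1)
-- or falls out early with an accidental False from sign-corrupted floor-division digits (e.g. i = -44),
-- which B's str(i)-based reading does not reproduce.
def Pre_check (i : Int) : Prop := 0 ≤ i
instance (i : Int) : Decidable (Pre_check i) := by unfold Pre_check; infer_instance
def pvWitness_check : Int := 122

def Spec_check (i : Int) (out : Bool) : Prop := out = check_alt i
instance (i : Int) (out : Bool) : Decidable (Spec_check i out) := by unfold Spec_check; infer_instance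

-- ===== CLAIM (what is proved, stated in full; the proofs are below) =====
def Claim_equal_check : Prop := ∀ (i : Int), Dom_check i → Pre_check i → Spec_check i (check i)

-- ===== LEMMAS AND PROOFS =====

-- the decimal digits of n, least significant first
def digsL : Nat → List Nat
  | 0 => []
  | n + 1 => ((n + 1) % 10) :: digsL ((n + 1) / 10)
  decreasing_by exact Nat.div_lt_self (Nat.succ_pos n) (by norm_num)

theorem digsL_pos {n : Nat} (h : 0 < n) : digsL n = n % 10 :: digsL (n / 10) := by
  cases n with
  | zero => omega
  | succ m => rw [digsL]

theorem digsL_lt : ∀ n, ∀ x ∈ digsL n, x < 10 := by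
  intro n
  induction n using Nat.strong_induction_on with
  | _ n ih =>
    cases n with
    | zero => simp [digsL]
    | succ m =>
      rw [digsL]
      intro x hx
      rcases List.mem_cons.1 hx with h | h
      · omega
      · exact ih ((m + 1) / 10) (Nat.div_lt_self (Nat.succ_pos m) (by norm_num)) x h

-- Nat.toDigits 10 n lists the digits most significant first
theorem toDigitsCore_eq : ∀ (f n : Nat) (l : List Char), n < f →
    Nat.toDigitsCore 10 f n l = ((n % 10 :: digsL (n / 10)).reverse.map Nat.digitChar) ++ l := by
  intro f
  induction f with
  | zero => intro n l h; omega
  | succ f ih =>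
    intro n l h
    show (if n / 10 = 0 then Nat.digitChar (n % 10) :: l
          else Nat.toDigitsCore 10 f (n / 10) (Nat.digitChar (n % 10) :: l)) = _
    by_cases h0 : n / 10 = 0
    · simp [h0, digsL]
    · rw [if_neg h0]
      have hlt : n / 10 < f := by
        have := Nat.div_lt_self (by omega : 0 < n) (by norm_num : 1 < 10)
        omega
      rw [ih (n / 10) _ hlt, digsL_pos (by omega : 0 < n / 10)]
      simp

theorem toDigits_eq {n : Nat} (h : 0 < n) :
    Nat.toDigits 10 n = (digsL n).reverse.map Nat.digitChar := by
  show Nat.toDigitsCore 10 (n + 1) n [] = _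
  rw [toDigitsCore_eq (n + 1) n [] (by omega), digsL_pos h]
  simp

-- A's loop over the digit list (least significant first)
def loopL : List Nat → Nat → Bool → Int → Bool
  | [], _, sd, ctr => sd || decide (ctr = 1)
  | d :: t, last, sd, ctr =>
    if d > last then false
    else if d = last then loopL t last sd (ctr + 1)
    else loopL t d (if ctr = 1 then true else sd) 0

-- A's fueled loop equals the list loop
theorem checkLoop_eq_loopL : ∀ (fuel : Nat) (i : Int), 0 ≤ i → i.toNat < fuel →
    ∀ (last : Nat) (sd : Bool) (ctr : Int),
    checkLoop fuel i (last : Int) sd ctr = loopL (digsL i.toNat) last sd ctr := by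
  intro fuel
  induction fuel with
  | zero => intro i _ h; omega
  | succ fuel ih =>
    intro i hi hf last sd ctr
    by_cases h0 : i = 0
    · subst h0; simp [checkLoop, digsL, loopL]
    · have hpos : 0 < i := lt_of_le_of_ne hi (Ne.symm h0)
      have hni : PySem.Int.floordiv i 10 = i / 10 :=
        PySem.Int.floordiv_eq_ediv_of_pos (by norm_num)
      have hd : i - (i / 10) * 10 = i % 10 := by omega
      have hdn : i % 10 = ((i.toNat % 10 : Nat) : Int) := by omega
      have hnn : i / 10 = ((i.toNat / 10 : Nat) : Int) := by omega
      have hfuel : (i / 10).toNat < fuel := by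
        have h1 : i.toNat / 10 < i.toNat := Nat.div_lt_self (by omega) (by norm_num)
        omega
      rw [show checkLoop (fuel + 1) i (last : Int) sd ctr =
          (if i = 0 then sd || decide (ctr = 1)
           else
             let ni := PySem.Int.floordiv i 10
             let d := i - ni * 10
             if d > (last : Int) then false
             else if d = (last : Int) then checkLoop fuel ni d sd (ctr + 1)
             else checkLoop fuel ni d (if ctr = 1 then true else sd) 0) from rfl]
      rw [if_neg h0]
      simp only [hni, hd, hdn]
      rw [digsL_pos (by omega : 0 < i.toNat), loopL]
      by_cases hgt : i.toNat % 10 > last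
      · rw [if_pos (by exact_mod_cast hgt), if_pos hgt]
      · rw [if_neg (by exact_mod_cast hgt), if_neg hgt]
        by_cases heq : i.toNat % 10 = last
        · rw [if_pos (by exact_mod_cast heq), if_pos heq]
          rw [show ((i.toNat % 10 : Nat) : Int) = ((last : Nat) : Int) by exact_mod_cast heq]
          rw [hnn, ih _ (by omega) (by omega)]
          congr 1
        · rw [if_neg (by exact_mod_cast heq), if_neg heq]
          rw [hnn, ih _ (by omega) (by omega)]
          congr 1

-- the order check of A's loop
def okL : List Nat → Nat → Bool
  | [], _ => true
  | d :: t, last => decide (d ≤ last) && okL t d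

-- the exactly-two-run check of A's loop
def gL : List Nat → Nat → Int → Bool
  | [], _, ctr => decide (ctr = 1)
  | d :: t, last, ctr =>
    if d = last then gL t last (ctr + 1) else (decide (ctr = 1) || gL t d 0)

theorem loopL_split : ∀ (l : List Nat) (last : Nat) (sd : Bool) (ctr : Int),
    loopL l last sd ctr = (okL l last && (sd || gL l last ctr)) := by
  intro l
  induction l with
  | nil => intro last sd ctr; simp [loopL, okL, gL]
  | cons d t ih =>
    intro last sd ctr
    by_cases h1 : d > last
    · have h1' : ¬ d ≤ last := by omega
      simp [loopL, okL, h1, h1']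
    · have hle : d ≤ last := by omega
      by_cases h2 : d = last
      · subst h2
        simp [loopL, okL, gL, ih]
      · rw [loopL, if_neg h1, if_neg h2, ih, okL, gL, if_neg h2]
        by_cases hc : ctr = 1 <;> simp [hc, hle]

-- run lengths of a list, scanning left to right
def goRuns {α : Type} [DecidableEq α] : List α → α → Nat → List Nat
  | [], _, k => [k]
  | d :: t, last, k => if d = last then goRuns t last (k + 1) else k :: goRuns t d 1

def lens {α : Type} [DecidableEq α] : List α → List Nat
  | [] => []
  | c :: t => goRuns t c 1

theorem beq2 (ctr : Int) (h : 0 ≤ ctr) : ((2 : Nat) == ctr.toNat + 1) = decide (ctr = 1) := by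
  by_cases hc : ctr = 1
  · subst hc; simp
  · rw [decide_eq_false hc, beq_eq_false_iff_ne]
    omega

theorem gL_goRuns : ∀ (l : List Nat) (last : Nat) (ctr : Int), 0 ≤ ctr →
    gL l last ctr = (goRuns l last (ctr.toNat + 1)).contains 2 := by
  intro l
  induction l with
  | nil =>
    intro last ctr h
    simp only [gL, goRuns, List.contains_cons, List.contains_nil, Bool.or_false]
    rw [beq2 ctr h]
  | cons d t ih =>
    intro last ctr h
    by_cases hdl : d = last
    · rw [gL, if_pos hdl, goRuns, if_pos hdl, ih _ _ (by omega),
        show (ctr + 1).toNat + 1 = ctr.toNat + 1 + 1 by omega]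
    · rw [gL, if_neg hdl, goRuns, if_neg hdl, List.contains_cons, beq2 ctr h,
        ih d 0 (by omega)]
      norm_num

-- goRuns over a constant block followed by a differently-headed rest
theorem goRuns_replicate {α : Type} [DecidableEq α] :
    ∀ (j : Nat) (rest : List α) (c : α) (k : Nat),
    (∀ d, rest.head? = some d → d ≠ c) →
    goRuns (List.replicate j c ++ rest) c k = (k + j) :: lens rest := by
  intro j
  induction j with
  | zero =>
    intro rest c k hrest
    cases rest with
    | nil => simp [goRuns, lens]
    | cons d r =>
      have hd : d ≠ c := hrest d (by simp)
      simp [goRuns, hd, lens]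
  | succ j ih =>
    intro rest c k hrest
    rw [List.replicate_succ, List.cons_append, goRuns, if_pos rfl, ih rest c (k + 1) hrest]
    congr 1
    omega

theorem lens_replicate {α : Type} [DecidableEq α] (j : Nat) (hj : 1 ≤ j) (c : α)
    (rest : List α) (hrest : ∀ d, rest.head? = some d → d ≠ c) :
    lens (List.replicate j c ++ rest) = j :: lens rest := by
  obtain ⟨j', rfl⟩ : ∃ j', j = j' + 1 := ⟨j - 1, by omega⟩
  rw [List.replicate_succ, List.cons_append]
  show goRuns (List.replicate j' c ++ rest) c 1 = _
  rw [goRuns_replicate j' rest c 1 hrest]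
  congr 1
  omega

theorem lens_reverse_aux {α : Type} [DecidableEq α] :
    ∀ (t : List α) (c : α) (j : Nat) (rest : List α), 1 ≤ j →
    (∀ d, rest.head? = some d → d ≠ c) →
    lens (t.reverse ++ (List.replicate j c ++ rest)) = (goRuns t c j).reverse ++ lens rest := by
  intro t
  induction t with
  | nil =>
    intro c j rest hj hrest
    rw [List.reverse_nil, List.nil_append, lens_replicate j hj c rest hrest]
    simp [goRuns]
  | cons e t' ih =>
    intro c j rest hj hrest
    rw [List.reverse_cons, List.append_assoc]
    by_cases hec : e = c
    · subst hec
      rw [show [e] ++ (List.replicate j e ++ rest) = List.replicate (j + 1) e ++ rest by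
        simp [List.replicate_succ]]
      rw [ih e (j + 1) rest (by omega) hrest, goRuns, if_pos rfl]
    · rw [show [e] ++ (List.replicate j c ++ rest) =
          List.replicate 1 e ++ (List.replicate j c ++ rest) by simp]
      rw [ih e 1 (List.replicate j c ++ rest) (by omega)
        (by
          intro d hd
          obtain ⟨j', rfl⟩ : ∃ j', j = j' + 1 := ⟨j - 1, by omega⟩
          simp [List.replicate_succ] at hd
          subst hd
          exact fun h => hec h.symm)]
      rw [lens_replicate j hj c rest hrest,
        show goRuns (e :: t') c j = j :: goRuns t' e 1 by rw [goRuns, if_neg hec]]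
      simp [List.append_assoc]

theorem lens_reverse {α : Type} [DecidableEq α] (d : α) (t : List α) :
    lens ((d :: t).reverse) = (goRuns t d 1).reverse := by
  have := lens_reverse_aux t d 1 [] (by omega) (by simp)
  simpa [lens] using this

-- lens is invariant under a map injective on the members
theorem goRuns_map {α β : Type} [DecidableEq α] [DecidableEq β] (f : α → β) :
    ∀ (t : List α) (c : α) (k : Nat),
    (∀ a ∈ c :: t, ∀ b ∈ c :: t, f a = f b → a = b) →
    goRuns (t.map f) (f c) k = goRuns t c k := by
  intro t
  induction t with
  | nil => intro c k _; simp [goRuns]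
  | cons e t' ih =>
    intro c k hinj
    by_cases hec : e = c
    · subst hec
      rw [List.map_cons, goRuns, if_pos rfl, goRuns, if_pos rfl]
      exact ih e (k + 1) (by
        intro a ha b hb hab
        exact hinj a (by simpa using (List.mem_cons.1 ha)) b (by simpa using (List.mem_cons.1 hb)) hab)
    · have hfec : f e ≠ f c := fun h => hec (hinj e (by simp) c (by simp) h)
      rw [List.map_cons, goRuns, if_neg hfec, goRuns, if_neg hec]
      congr 1
      exact ih e 1 (by
        intro a ha b hb hab
        rcases List.mem_cons.1 ha with rfl | ha' <;> rcases List.mem_cons.1 hb with rfl | hb'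
        · rfl
        · exact hinj a (by simp) b (by simp [hb']) hab
        · exact hinj a (by simp [ha']) b (by simp) hab
        · exact hinj a (by simp [ha']) b (by simp [hb']) hab)

theorem lens_map {α β : Type} [DecidableEq α] [DecidableEq β] (f : α → β) (l : List α)
    (hinj : ∀ a ∈ l, ∀ b ∈ l, f a = f b → a = b) : lens (l.map f) = lens l := by
  cases l with
  | nil => rfl
  | cons c t => exact goRuns_map f t c 1 hinj

-- B's run loop computes lens
theorem bumpLast_append : ∀ (rs : List Int) (x : Int), bumpLast (rs ++ [x]) = rs ++ [x + 1] := by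
  intro rs
  induction rs with
  | nil => intro x; rfl
  | cons a rs ih =>
    intro x
    cases rs with
    | nil => rfl
    | cons b t => simpa [bumpLast] using ih x

theorem runLoop_inv : ∀ (m : List Char) (p : Char) (rs : List Int) (c : Nat),
    runLoop m (some p) (rs ++ [(c : Int)]) = rs ++ (goRuns m p c).map (fun k : Nat => (k : Int)) := by
  intro m
  induction m with
  | nil => intro p rs c; simp [runLoop, goRuns]
  | cons e t ih =>
    intro p rs c
    by_cases hep : e = p
    · rw [runLoop, if_pos (by rw [hep]), bumpLast_append,
        show ((c : Int) + 1) = ((c + 1 : Nat) : Int) by push_cast; ring, ih p rs (c + 1),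
        goRuns, if_pos hep]
    · rw [runLoop, if_neg (by simpa using hep), List.append_assoc,
        show ([(c : Int)] ++ [(1 : Int)]) = ([(c : Int)] ++ [((1 : Nat) : Int)]) by norm_num]
      rw [← List.append_assoc, ih e (rs ++ [(c : Int)]) 1, goRuns, if_neg hep]
      simp

theorem runLoop_none (m : List Char) :
    runLoop m none [] = (lens m).map (fun k : Nat => (k : Int)) := by
  cases m with
  | nil => rfl
  | cons c t =>
    rw [runLoop, if_neg (by simp)]
    have := runLoop_inv t c [] 1
    simpa [lens] using this

-- order-check characterisations
theorem okL_iff : ∀ (l : List Nat) (last : Nat),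
    okL l last = true ↔
      (l.Pairwise (fun a b => b ≤ a) ∧ ∀ hd, l.head? = some hd → hd ≤ last) := by
  intro l
  induction l with
  | nil => intro last; simp [okL]
  | cons d t ih =>
    intro last
    simp only [okL, Bool.and_eq_true, decide_eq_true_eq, ih, List.pairwise_cons,
      List.head?_cons, Option.some.injEq]
    constructor
    · rintro ⟨hdl, ⟨hp, hh⟩⟩
      refine ⟨⟨?_, hp⟩, ?_⟩
      · intro x hx
        cases t with
        | nil => simp at hx
        | cons e t' =>
          have he : e ≤ d := hh e rfl
          rcases List.mem_cons.1 hx with rfl | hx'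
          · exact he
          · exact le_trans (List.rel_of_pairwise_cons hp hx') he
      · intro hd h; omega
    · rintro ⟨⟨hall, hp⟩, hh⟩
      refine ⟨hh d rfl, hp, ?_⟩
      intro hd h
      exact hall hd (by cases t <;> simp_all)

theorem digitChar_le_iff {a b : Nat} (ha : a < 10) (hb : b < 10) :
    Nat.digitChar a ≤ Nat.digitChar b ↔ a ≤ b := by
  interval_cases a <;> interval_cases b <;> decide

theorem digitChar_inj {a b : Nat} (ha : a < 10) (hb : b < 10)
    (h : Nat.digitChar a = Nat.digitChar b) : a = b := by
  interval_cases a <;> interval_cases b <;> first | rfl | (exfalso; exact absurd h (by decide))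

-- the sortedness test is the pairwise order
theorem sorted_self_iff (m : List Char) :
    m = PySem.List.sorted m (fun c => c) false ↔ m.Pairwise (fun a b : Char => a ≤ b) := by
  constructor
  · intro h
    have := PySem.List.sorted_pairwise m (fun c : Char => c)
    rw [← h] at this
    exact this
  · intro h
    exact (PySem.List.sorted_eq_self_of_pairwise m (fun c : Char => c) h).symm

theorem contains_map_cast (xs : List Nat) :
    (xs.map (fun k : Nat => (k : Int))).contains 2 = xs.contains 2 := by
  simp only [List.contains_eq_mem, List.mem_map, decide_eq_decide]
  constructor
  · rintro ⟨a, ha, h⟩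
    have : a = 2 := by omega
    exact this ▸ ha
  · intro h; exact ⟨2, h, rfl⟩

-- assembling the two sides for a positive input
theorem main_pos (n : Nat) (hn : 0 < n) : check (n : Int) = check_alt (n : Int) := by
  -- name the digit list
  obtain ⟨d, t, hl⟩ : ∃ d t, digsL n = d :: t := ⟨n % 10, digsL (n / 10), digsL_pos hn⟩
  have hlt : ∀ x ∈ digsL n, x < 10 := digsL_lt n
  have hdlt : d < 10 := by rw [hl] at hlt; exact hlt d (by simp)
  have htlt : ∀ x ∈ t, x < 10 := by rw [hl] at hlt; intro x hx; exact hlt x (by simp [hx])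
  -- A's side
  have hA : check (n : Int) = (okL (digsL n) 10 && gL (digsL n) 10 0) := by
    rw [show check (n : Int) = checkLoop ((n : Int).natAbs + 1) (n : Int) 10 false 0 from rfl]
    rw [show ((10 : Int)) = ((10 : Nat) : Int) by norm_num]
    rw [checkLoop_eq_loopL ((n : Int).natAbs + 1) (n : Int) (by exact Int.natCast_nonneg n) (by simp),
      Int.toNat_natCast, loopL_split]
    simp
  -- B's string is the reversed digit list
  have hs : (PySem.Int.toStr (n : Int)).toList = (digsL n).reverse.map Nat.digitChar := by
    rw [PySem.Int.toList_toStr]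
    show PySem.Int.toChars (n : Int) = _
    rw [PySem.Int.toChars, if_neg (by omega)]
    rw [Int.toNat_natCast]
    exact toDigits_eq hn
  set m : List Char := (digsL n).reverse.map Nat.digitChar with hm
  have hB : check_alt (n : Int) =
      (decide (m = PySem.List.sorted m (fun c => c) false) && (runLoop m none []).contains 2) := by
    show (if (PySem.Int.toStr (n : Int)).toList =
        PySem.List.sorted (PySem.Int.toStr (n : Int)).toList (fun c => c) false then
        (runLoop (PySem.Int.toStr (n : Int)).toList none []).contains 2 else false) = _
    rw [hs]
    by_cases h : m = PySem.List.sorted m (fun c => c) false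
    · rw [if_pos h, decide_eq_true h, Bool.true_and]
    · rw [if_neg h, decide_eq_false h, Bool.false_and]
  rw [hA, hB]
  -- order components agree
  have hOrd : okL (digsL n) 10 = decide (m = PySem.List.sorted m (fun c => c) false) := by
    have h1 : okL (digsL n) 10 = true ↔ m.Pairwise (fun a b : Char => a ≤ b) := by
      rw [okL_iff, hm]
      rw [List.pairwise_map, List.pairwise_reverse]
      constructor
      · rintro ⟨hp, _⟩
        exact hp.imp_of_mem (fun {a b} ha hb h =>
          (digitChar_le_iff (hlt b hb) (hlt a ha)).2 h)
      · intro hp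
        refine ⟨hp.imp_of_mem (fun {a b} ha hb h =>
          (digitChar_le_iff (hlt b hb) (hlt a ha)).1 h), ?_⟩
        intro hd hh
        have hmem : hd ∈ digsL n := by
          rw [hl] at hh ⊢
          simp only [List.head?_cons, Option.some.injEq] at hh
          simp [hh]
        have := hlt hd hmem
        omega
    rw [← sorted_self_iff] at h1
    by_cases h : m = PySem.List.sorted m (fun c => c) false
    · rw [h1.2 h, decide_eq_true h]
    · rw [decide_eq_false h]
      cases hok : okL (digsL n) 10
      · rfl
      · exact absurd (h1.1 hok) h
  -- run components agree
  have hRun : gL (digsL n) 10 0 = (runLoop m none []).contains 2 := by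
    rw [runLoop_none, contains_map_cast]
    have hml : lens m = (goRuns t d 1).reverse := by
      rw [hm, hl]
      rw [lens_map Nat.digitChar (d :: t).reverse (by
        intro a ha b hb
        rw [List.mem_reverse] at ha hb
        rw [← hl] at ha hb
        exact digitChar_inj (hlt a ha) (hlt b hb))]
      exact lens_reverse d t
    rw [hml]
    rw [hl, gL, if_neg (by omega), gL_goRuns t d 0 (le_refl 0)]
    simp [List.contains_eq_mem]
  rw [hOrd, hRun]

-- ===== VERDICT (by name: the statement is the Claim_ definition above) =====
theorem check_spec : Claim_equal_check := by
  intro i _ hpre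
  unfold Spec_check
  lift i to Nat using hpre with n
  by_cases hn : n = 0
  · subst hn; decide
  · exact main_pos n (by omega)
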